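-- pv_equiv track=rewrite | github.com/WeianMao/triattention | R-KV/weian_development/tests/test_compression_trigger_diff.py | simulate_aligned_budget_compression
-- ===== SOURCE A (Python) =====
-- def simulate_aligned_budget_compression(prefill_len: int, budget: int, divide_length: int, total_steps: int):
--     """Simulate rkv_speckv_generate.py compression triggering with rkv_aligned_budget=True."""
--     cache_size = prefill_len
--     absolute_position = prefill_len
--     compressions = []
--
--     trigger_threshold = budget + divide_length
--
--     for step in range(total_steps):
--         # Simulate adding one token
--         cache_size += 1
--         absolute_position += 1
--
--         # Trigger condition from rkv_speckv_generate.py:261-265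
--         if cache_size >= trigger_threshold:
--             compressions.append({
--                 "step": step,
--                 "abs_pos": absolute_position,
--                 "before": cache_size,
--                 "after": budget,
--             })
--             cache_size = budget
--
--     return compressions
-- ===== SOURCE B (Python) =====
-- def simulate_aligned_budget_compression(prefill_len: int, budget: int, divide_length: int, total_steps: int):
--     """Closed-form simulation: first trigger step, then one row per stride, no per-step loop."""
--     threshold = budget + divide_length
--     stride = max(divide_length, 1)
--     step0 = max(0, threshold - prefill_len - 1)
--     if total_steps <= step0:
--         return []
--     first = {
--         "step": step0,
--         "abs_pos": prefill_len + step0 + 1,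
--         "before": prefill_len + step0 + 1,
--         "after": budget,
--     }
--     k = (total_steps - step0 - 1) // stride
--     rest = [
--         {
--             "step": step0 + (i + 1) * stride,
--             "abs_pos": prefill_len + step0 + (i + 1) * stride + 1,
--             "before": budget + stride,
--             "after": budget,
--         }
--         for i in range(k)
--     ]
--     return [first] + rest
-- ===== Notes on version B (the rewrite author's own statement) =====
-- stated objective: faster
-- what changed: Replaced the per-step simulation loop with a closed form: compute the first trigger step directly, then emit one row per trigger by striding divide_length (clamped to 1) steps at a time.
import Mathlib
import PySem

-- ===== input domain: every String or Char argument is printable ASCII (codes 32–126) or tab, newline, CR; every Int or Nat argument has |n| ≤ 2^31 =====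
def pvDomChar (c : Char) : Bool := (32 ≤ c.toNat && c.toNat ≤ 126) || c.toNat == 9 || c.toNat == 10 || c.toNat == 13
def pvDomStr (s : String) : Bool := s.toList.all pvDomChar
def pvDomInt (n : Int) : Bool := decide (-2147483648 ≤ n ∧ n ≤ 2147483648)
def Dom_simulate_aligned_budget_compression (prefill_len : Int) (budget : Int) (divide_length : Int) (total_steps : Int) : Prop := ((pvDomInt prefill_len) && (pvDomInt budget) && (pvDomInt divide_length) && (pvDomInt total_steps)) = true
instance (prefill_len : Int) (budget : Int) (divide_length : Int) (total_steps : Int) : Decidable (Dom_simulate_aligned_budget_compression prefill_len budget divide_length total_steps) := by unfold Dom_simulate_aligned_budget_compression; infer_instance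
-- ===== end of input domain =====

-- B replaces A's per-step simulation loop with a closed form (first trigger step, then one
-- row per stride), which a timing run measured as asymptotically faster.


-- ===== PORT A =====
-- Literal port of A: fold over range(total_steps) carrying (cache_size, absolute_position, compressions).
def simulate_aligned_budget_compression (prefill_len : Int) (budget : Int) (divide_length : Int) (total_steps : Int) : List (List (String × Int)) :=
  let trigger_threshold := budget + divide_length
  let st := (PySem.List.pyRange 0 total_steps 1).foldl
    (fun (s : Int × Int × List (List (String × Int))) (step : Int) =>
      let cache_size := s.1 + 1
      let absolute_position := s.2.1 + 1
      if trigger_threshold ≤ cache_size then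
        (budget, absolute_position,
          s.2.2 ++ [[("step", step), ("abs_pos", absolute_position),
                     ("before", cache_size), ("after", budget)]])
      else
        (cache_size, absolute_position, s.2.2))
    (prefill_len, prefill_len, [])
  st.2.2

-- ===== PORT B =====
-- Literal port of B (Source B): closed form, first trigger then one row per stride.
def simulate_aligned_budget_compression_alt (prefill_len : Int) (budget : Int) (divide_length : Int) (total_steps : Int) : List (List (String × Int)) :=
  let threshold := budget + divide_length
  let stride := max divide_length 1
  let step0 := max 0 (threshold - prefill_len - 1)
  if total_steps ≤ step0 then []
  else
    let first : List (String × Int) :=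
      [("step", step0), ("abs_pos", prefill_len + step0 + 1),
       ("before", prefill_len + step0 + 1), ("after", budget)]
    let k := PySem.Int.floordiv (total_steps - step0 - 1) stride
    let rest := (List.range k.toNat).map (fun (i : Nat) =>
      [("step", step0 + ((i : Int) + 1) * stride),
       ("abs_pos", prefill_len + step0 + ((i : Int) + 1) * stride + 1),
       ("before", budget + stride), ("after", budget)])
    first :: rest

-- ===== PRECONDITION & SPEC =====
def Spec_simulate_aligned_budget_compression (prefill_len : Int) (budget : Int) (divide_length : Int) (total_steps : Int) (out : List (List (String × Int))) : Prop := out = simulate_aligned_budget_compression_alt prefill_len budget divide_length total_steps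
instance (prefill_len : Int) (budget : Int) (divide_length : Int) (total_steps : Int) (out : List (List (String × Int))) : Decidable (Spec_simulate_aligned_budget_compression prefill_len budget divide_length total_steps out) := by unfold Spec_simulate_aligned_budget_compression; infer_instance

-- ===== CLAIM (what is proved, stated in full; the proofs are below) =====
def Claim_equal_simulate_aligned_budget_compression : Prop := ∀ (prefill_len : Int) (budget : Int) (divide_length : Int) (total_steps : Int), Dom_simulate_aligned_budget_compression prefill_len budget divide_length total_steps → Spec_simulate_aligned_budget_compression prefill_len budget divide_length total_steps (simulate_aligned_budget_compression prefill_len budget divide_length total_steps)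

-- ===== LEMMAS AND PROOFS =====

-- One output row.
def pvRow (step abspos before b : Int) : List (String × Int) :=
  [("step", step), ("abs_pos", abspos), ("before", before), ("after", b)]

lemma pvRow_congr (b : Int) {s s' a a' c c' : Int} (h1 : s = s') (h2 : a = a') (h3 : c = c') :
    pvRow s a c b = pvRow s' a' c' b := by rw [h1, h2, h3]

-- Closed-form description of what A's loop emits from an arbitrary state:
-- k0 steps pass without a trigger, then one trigger row, then recurse from cache = b.
def pvF (b thr : Int) (m : Nat) (s c a : Int) : List (List (String × Int)) :=
  let k0 := (max 0 (thr - c - 1)).toNat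
  if m ≤ k0 then []
  else pvRow (s + k0) (a + k0 + 1) (c + k0 + 1) b ::
       pvF b thr (m - k0 - 1) (s + k0 + 1) b (a + k0 + 1)
decreasing_by omega

lemma pvF_zero (b thr s c a : Int) : pvF b thr 0 s c a = [] := by
  rw [pvF]; simp

lemma pvF_trigger (b thr : Int) (m : Nat) (s c a : Int) (h : thr ≤ c + 1) :
    pvF b thr (m + 1) s c a = pvRow s (a + 1) (c + 1) b :: pvF b thr m (s + 1) b (a + 1) := by
  rw [pvF]
  have hk : (max 0 (thr - c - 1)).toNat = 0 := by omega
  simp [hk]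

lemma pvF_skip (b thr : Int) (m : Nat) (s c a : Int) (h : c + 1 < thr) :
    pvF b thr (m + 1) s c a = pvF b thr m (s + 1) (c + 1) (a + 1) := by
  conv_lhs => rw [pvF]
  conv_rhs => rw [pvF]
  have h1 : (max 0 (thr - c - 1)).toNat = (max 0 (thr - (c+1) - 1)).toNat + 1 := by omega
  by_cases hm : m ≤ (max 0 (thr - (c+1) - 1)).toNat
  · have hm1 : m + 1 ≤ (max 0 (thr - c - 1)).toNat := by omega
    simp [hm, hm1]
  · have hm1 : ¬ (m + 1 ≤ (max 0 (thr - c - 1)).toNat) := by omega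
    simp only [hm, hm1, if_false]
    have e1 : s + ((max 0 (thr - c - 1)).toNat : Int) = s + 1 + ((max 0 (thr - (c+1) - 1)).toNat : Int) := by omega
    have e2 : a + ((max 0 (thr - c - 1)).toNat : Int) + 1 = a + 1 + ((max 0 (thr - (c+1) - 1)).toNat : Int) + 1 := by omega
    have e3 : c + ((max 0 (thr - c - 1)).toNat : Int) + 1 = c + 1 + ((max 0 (thr - (c+1) - 1)).toNat : Int) + 1 := by omega
    have e4 : m + 1 - (max 0 (thr - c - 1)).toNat - 1 = m - (max 0 (thr - (c+1) - 1)).toNat - 1 := by omega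
    have e5 : s + ((max 0 (thr - c - 1)).toNat : Int) + 1 = s + 1 + ((max 0 (thr - (c+1) - 1)).toNat : Int) + 1 := by omega
    rw [e1, e2, e3, e4]

-- The fold body of A's port.
def pvStep (thr b : Int) (s : Int × Int × List (List (String × Int))) (step : Int) :
    Int × Int × List (List (String × Int)) :=
  let cache_size := s.1 + 1
  let absolute_position := s.2.1 + 1
  if thr ≤ cache_size then
    (b, absolute_position, s.2.2 ++ [pvRow step absolute_position cache_size b])
  else
    (cache_size, absolute_position, s.2.2)

-- Bridge: A's fold over range [s, s+m) equals acc ++ the closed-form description pvF.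
lemma pvFold_eq_F (b thr : Int) (m : Nat) : ∀ (s c a : Int) (acc : List (List (String × Int))),
    ((PySem.List.pyRange s (s + m) 1).foldl (pvStep thr b) (c, a, acc)).2.2
      = acc ++ pvF b thr m s c a := by
  induction m with
  | zero =>
    intro s c a acc
    rw [PySem.List.pyRange_one_eq_nil (by omega)]
    simp [pvF_zero]
  | succ n ih =>
    intro s c a acc
    have hb : s + (((n : Nat) + 1 : Nat) : Int) = s + 1 + (n : Int) := by push_cast; ring
    rw [hb, PySem.List.pyRange_one_cons (by omega)]
    simp only [List.foldl_cons]
    by_cases h : thr ≤ c + 1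
    · rw [pvF_trigger b thr n s c a h]
      have hstep : pvStep thr b (c, a, acc) s
          = (b, a + 1, acc ++ [pvRow s (a + 1) (c + 1) b]) := by
        simp [pvStep, h]
      rw [hstep, ih (s + 1) b (a + 1) (acc ++ [pvRow s (a + 1) (c + 1) b])]
      simp
    · rw [pvF_skip b thr n s c a (by omega)]
      have hstep : pvStep thr b (c, a, acc) s = (c + 1, a + 1, acc) := by
        simp [pvStep, h]
      rw [hstep, ih (s + 1) (c + 1) (a + 1) acc]

-- Post-reset closed form: from cache = b, pvF emits one row every `stride` steps.
lemma pvF_post (b d : Int) (m : Nat) : ∀ (s a : Int),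
    pvF b (b + d) m s b a
      = (List.range (m / (max d 1).toNat)).map (fun (i : Nat) =>
          pvRow (s + (max d 1) - 1 + (i : Int) * (max d 1))
                (a + (max d 1) + (i : Int) * (max d 1))
                (b + (max d 1)) b) := by
  induction m using Nat.strong_induction_on with
  | _ m ih =>
    intro s a
    rw [pvF]
    have hstride : (1 : Int) ≤ max d 1 := by omega
    have hk0 : ((max 0 (b + d - b - 1)).toNat : Int) = max d 1 - 1 := by omega
    by_cases hm : m ≤ (max 0 (b + d - b - 1)).toNat
    · have hdiv : m / (max d 1).toNat = 0 := by
        apply Nat.div_eq_of_lt; omega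
      rw [if_pos hm, hdiv]
      simp
    · rw [if_neg hm]
      have hrec := ih (m - (max 0 (b + d - b - 1)).toNat - 1) (by omega)
        (s + ((max 0 (b + d - b - 1)).toNat : Int) + 1)
        (a + ((max 0 (b + d - b - 1)).toNat : Int) + 1)
      rw [hrec]
      have hsub : m - (max 0 (b + d - b - 1)).toNat - 1 = m - (max d 1).toNat := by omega
      have hdiv : m / (max d 1).toNat
          = (m - (max 0 (b + d - b - 1)).toNat - 1) / (max d 1).toNat + 1 := by
        rw [hsub, ← Nat.div_eq_sub_div (by omega) (by omega)]
      rw [hdiv, List.range_succ_eq_map, List.map_cons, List.map_map]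
      congr 1
      · apply pvRow_congr <;> (try rw [hk0]) <;> push_cast <;> ring
      · apply List.map_congr_left
        intro i _
        simp only [Function.comp, Nat.succ_eq_add_one]
        apply pvRow_congr <;> (try rw [hk0]) <;> push_cast <;> ring

lemma pvToNat_floordiv (x y : Int) (hx : 0 ≤ x) (hy : 0 ≤ y) :
    (PySem.Int.floordiv x y).toNat = x.toNat / y.toNat := by
  obtain ⟨m, rfl⟩ := Int.eq_ofNat_of_zero_le hx
  obtain ⟨k, rfl⟩ := Int.eq_ofNat_of_zero_le hy
  rw [PySem.Int.floordiv_natCast, Int.toNat_natCast, Int.toNat_natCast, Int.toNat_natCast]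

-- Full closed form: pvF from the initial state equals B's structure.
lemma pvF_closed (p b d : Int) (m : Nat) :
    pvF b (b + d) m 0 p p
      = (if (m : Int) ≤ max 0 (b + d - p - 1) then []
         else
           pvRow (max 0 (b + d - p - 1)) (p + max 0 (b + d - p - 1) + 1)
                 (p + max 0 (b + d - p - 1) + 1) b ::
           (List.range ((((m : Int) - max 0 (b + d - p - 1) - 1).toNat) / (max d 1).toNat)).map
             (fun (i : Nat) =>
               pvRow (max 0 (b + d - p - 1) + ((i : Int) + 1) * (max d 1))
                     (p + max 0 (b + d - p - 1) + ((i : Int) + 1) * (max d 1) + 1)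
                     (b + max d 1) b)) := by
  rw [pvF]
  have hk0 : ((max 0 (b + d - p - 1)).toNat : Int) = max 0 (b + d - p - 1) := by omega
  by_cases hm : m ≤ (max 0 (b + d - p - 1)).toNat
  · have h2 : ((m : Int) ≤ max 0 (b + d - p - 1)) := by omega
    rw [if_pos hm, if_pos h2]
  · have h2 : ¬ ((m : Int) ≤ max 0 (b + d - p - 1)) := by omega
    rw [if_neg hm, if_neg h2, pvF_post]
    have hnat : m - (max 0 (b + d - p - 1)).toNat - 1
        = ((m : Int) - max 0 (b + d - p - 1) - 1).toNat := by omega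
    rw [hnat]
    congr 1
    · apply pvRow_congr <;> (try rw [hk0]) <;> push_cast <;> ring
    · apply List.map_congr_left
      intro i _
      apply pvRow_congr <;> (try rw [hk0]) <;> push_cast <;> ring

-- ===== VERDICT (by name: the statement is the Claim_ definition above) =====
theorem simulate_aligned_budget_compression_spec : Claim_equal_simulate_aligned_budget_compression := by
  intro p b d t _
  unfold Spec_simulate_aligned_budget_compression
  unfold simulate_aligned_budget_compression simulate_aligned_budget_compression_alt
  simp only []
  have hfoldbody : (fun (s : Int × Int × List (List (String × Int))) (step : Int) =>
      let cache_size := s.1 + 1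
      let absolute_position := s.2.1 + 1
      if b + d ≤ cache_size then
        (b, absolute_position,
          s.2.2 ++ [[("step", step), ("abs_pos", absolute_position),
                     ("before", cache_size), ("after", b)]])
      else
        (cache_size, absolute_position, s.2.2)) = pvStep (b + d) b := by
    funext s step
    simp [pvStep, pvRow]
  rw [hfoldbody]
  by_cases ht : t ≤ 0
  · rw [PySem.List.pyRange_one_eq_nil (by omega)]
    have h0 : (0 : Int) ≤ max 0 (b + d - p - 1) := by omega
    have : t ≤ max 0 (b + d - p - 1) := by omega
    simp [this]
  · have htn : t = ((t.toNat : Nat) : Int) := by omega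
    have hbridge := pvFold_eq_F b (b + d) t.toNat 0 p p []
    rw [show (0 : Int) + (t.toNat : Int) = t by omega] at hbridge
    rw [hbridge, List.nil_append, pvF_closed]
    have htc : ((t.toNat : Nat) : Int) = t := by omega
    rw [htc]
    by_cases hle : t ≤ max 0 (b + d - p - 1)
    · simp [hle]
    · simp only [hle, if_false]
      have hy : (0:Int) < max d 1 := by omega
      have hfd : (PySem.Int.floordiv (t - max 0 (b + d - p - 1) - 1) (max d 1)).toNat
          = (t - max 0 (b + d - p - 1) - 1).toNat / (max d 1).toNat :=
        pvToNat_floordiv _ _ (by omega) (by omega)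
      rw [hfd]
      rfl
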